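-- pv_equiv track=rewrite | github.com/kelvinalmeida/sep-agentic-com-personalizacao-individual | orquestrador/routes/orchestrator/agente_control/agente_control_routes.py | _find_advancement_tactic_index
-- ===== SOURCE A (Python) =====
-- import unicodedata
--
-- def _normalize_text(value):
--     return " ".join(str(value or "").split())
--
-- def _normalize_label(value):
--     text = unicodedata.normalize("NFKD", str(value or ""))
--     text = "".join(ch for ch in text if not unicodedata.combining(ch))
--     return _normalize_text(text).lower()
--
-- def _get_tactic_kind(tactic):
--     normalized_name = _normalize_label(tactic.get("name", ""))
--     normalized_description = _normalize_label(tactic.get("description", ""))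
--     text = f"{normalized_name} {normalized_description}".strip()
--
--     if "mudanca de estrategia" in normalized_name or "mudanca de estrategia" in text:
--         return "strategy_change"
--     if "reuso" in text:
--         return "reuse"
--     if "debate" in text or "sincrono" in text:
--         return "debate"
--     if "envio de informacao" in text:
--         return "information"
--     if "regra" in text:
--         return "rules"
--     return "other"
--
-- def _find_advancement_tactic_index(current_index, executed_indices, tactics):
--     executed_set = {
--         idx for idx in executed_indices
--         if isinstance(idx, int) and 0 <= idx < len(tactics)
--     }
--
--     for idx in range(current_index + 1, len(tactics)):
--         if idx in executed_set:
--             continue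
--         if _get_tactic_kind(tactics[idx]) == "strategy_change":
--             continue
--         return idx
--
--     for idx in range(current_index + 1, len(tactics)):
--         if _get_tactic_kind(tactics[idx]) != "strategy_change":
--             return idx
--
--     return current_index
-- ===== SOURCE B (Python) =====
-- import unicodedata
--
-- def _normalize_text(value):
--     return " ".join(str(value or "").split())
--
-- def _normalize_label(value):
--     text = unicodedata.normalize("NFKD", str(value or ""))
--     text = "".join(ch for ch in text if not unicodedata.combining(ch))
--     return _normalize_text(text).lower()
--
-- def _get_tactic_kind(tactic):
--     normalized_name = _normalize_label(tactic.get("name", ""))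
--     normalized_description = _normalize_label(tactic.get("description", ""))
--     text = f"{normalized_name} {normalized_description}".strip()
--
--     if "mudanca de estrategia" in normalized_name or "mudanca de estrategia" in text:
--         return "strategy_change"
--     if "reuso" in text:
--         return "reuse"
--     if "debate" in text or "sincrono" in text:
--         return "debate"
--     if "envio de informacao" in text:
--         return "information"
--     if "regra" in text:
--         return "rules"
--     return "other"
--
-- def _find_advancement_tactic_index(current_index, executed_indices, tactics):
--     executed_set = {
--         idx for idx in executed_indices
--         if isinstance(idx, int) and 0 <= idx < len(tactics)
--     }
--
--     fallback = None
--     for idx in range(current_index + 1, len(tactics)):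
--         if _get_tactic_kind(tactics[idx]) == "strategy_change":
--             continue
--         if idx not in executed_set:
--             return idx
--         if fallback is None:
--             fallback = idx
--     return current_index if fallback is None else fallback
-- ===== Notes on version B (the rewrite author's own statement) =====
-- stated objective: simpler
-- what changed: A's two sequential scans of range(current_index+1, len(tactics)) are merged into one forward pass that returns the first non-executed non-strategy_change index and keeps the first non-strategy_change index as a fallback.
-- outside the precondition, e.g. on _find_advancement_tactic_index(-4, [], [{'name': 'regra'}]): A raises IndexError, B raises IndexError
import Mathlib
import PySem

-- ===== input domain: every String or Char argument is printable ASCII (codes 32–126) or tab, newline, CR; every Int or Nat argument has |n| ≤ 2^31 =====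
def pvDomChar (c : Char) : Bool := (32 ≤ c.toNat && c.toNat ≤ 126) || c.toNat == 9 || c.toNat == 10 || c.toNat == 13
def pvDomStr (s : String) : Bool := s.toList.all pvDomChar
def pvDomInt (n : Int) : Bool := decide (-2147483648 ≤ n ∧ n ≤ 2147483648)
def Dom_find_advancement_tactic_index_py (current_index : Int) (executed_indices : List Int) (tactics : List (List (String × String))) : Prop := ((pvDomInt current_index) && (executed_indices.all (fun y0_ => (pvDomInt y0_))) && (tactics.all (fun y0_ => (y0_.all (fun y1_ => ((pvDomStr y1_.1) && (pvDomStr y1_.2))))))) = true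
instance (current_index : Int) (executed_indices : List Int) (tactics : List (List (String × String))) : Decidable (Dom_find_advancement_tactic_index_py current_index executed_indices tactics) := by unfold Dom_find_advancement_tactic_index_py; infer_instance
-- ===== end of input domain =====

-- B merges A's two sequential scans into ONE forward pass with a fallback accumulator (objective: simpler, one loop instead of two).

-- ===== PORT A =====
-- Shared helper: _normalize_label. On the ASCII domain unicodedata.normalize("NFKD", ·) is the
-- identity and no combining characters occur, so it is exactly whitespace-normalize + lower;
-- 'value or ""' is the identity on strings here ('' or '' == '').
def pvNormalizeLabel (s : String) : String :=
  PySem.Str.lower (PySem.Str.join " " (PySem.Str.split₀ s))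

-- Shared helper: _get_tactic_kind, branch for branch (f"{a} {b}" = " ".join([a, b])).
def pvTacticKind (tactic : List (String × String)) : String :=
  let normalized_name := pvNormalizeLabel (PySem.Dict.getD (PySem.Dict.mk tactic) "name" "")
  let normalized_description := pvNormalizeLabel (PySem.Dict.getD (PySem.Dict.mk tactic) "description" "")
  let text := PySem.Str.strip (PySem.Str.join " " [normalized_name, normalized_description])
  if PySem.Str.isIn "mudanca de estrategia" normalized_name || PySem.Str.isIn "mudanca de estrategia" text then "strategy_change"
  else if PySem.Str.isIn "reuso" text then "reuse"
  else if PySem.Str.isIn "debate" text || PySem.Str.isIn "sincrono" text then "debate"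
  else if PySem.Str.isIn "envio de informacao" text then "information"
  else if PySem.Str.isIn "regra" text then "rules"
  else "other"

-- Shared helper: the executed_set comprehension (isinstance(idx, int) is always true here).
def pvExecutedSet (executed_indices : List Int) (n : Int) : PySem.Set Int :=
  PySem.Set.ofList (executed_indices.filter (fun idx => decide (0 ≤ idx) && decide (idx < n)))

-- A's first loop: skip executed, skip strategy_change, return the first remaining index.
-- pyGet? = none is Python's IndexError (excluded by Pre_): the value there is arbitrary.
def pvALoop1 (ex : PySem.Set Int) (tactics : List (List (String × String))) : List Int → Option Int
  | [] => none
  | idx :: rest =>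
    if PySem.Set.contains ex idx then pvALoop1 ex tactics rest
    else
      match PySem.List.pyGet? tactics idx with
      | none => some 0
      | some t => if pvTacticKind t == "strategy_change" then pvALoop1 ex tactics rest else some idx

-- A's second loop: return the first non-strategy_change index.
def pvALoop2 (tactics : List (List (String × String))) : List Int → Option Int
  | [] => none
  | idx :: rest =>
    match PySem.List.pyGet? tactics idx with
    | none => some 0
    | some t => if pvTacticKind t == "strategy_change" then pvALoop2 tactics rest else some idx

def find_advancement_tactic_index_py (current_index : Int) (executed_indices : List Int) (tactics : List (List (String × String))) : Int :=
  let executed_set := pvExecutedSet executed_indices tactics.length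
  let r := PySem.List.pyRange (current_index + 1) tactics.length
  match pvALoop1 executed_set tactics r with
  | some i => i
  | none =>
    match pvALoop2 tactics r with
    | some i => i
    | none => current_index

-- ===== PORT B =====
-- B's single loop: kind first; skip strategy_change; return the first non-executed index;
-- remember the first executed non-strategy_change index as fallback.
def pvBLoop (ex : PySem.Set Int) (tactics : List (List (String × String))) (current_index : Int)
    (fallback : Option Int) : List Int → Int
  | [] => match fallback with | none => current_index | some f => f
  | idx :: rest =>
    match PySem.List.pyGet? tactics idx with
    | none => 0
    | some t =>
      if pvTacticKind t == "strategy_change" then pvBLoop ex tactics current_index fallback rest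
      else if !(PySem.Set.contains ex idx) then idx
      else pvBLoop ex tactics current_index
        (match fallback with | none => some idx | some f => some f) rest

def find_advancement_tactic_index_py_alt (current_index : Int) (executed_indices : List Int) (tactics : List (List (String × String))) : Int :=
  let executed_set := pvExecutedSet executed_indices tactics.length
  pvBLoop executed_set tactics current_index none
    (PySem.List.pyRange (current_index + 1) tactics.length)

-- ===== PRECONDITION & SPEC =====
-- A raises IndexError exactly when current_index + 1 < -len(tactics): the loop then starts at a
-- negative index below the wraparound range and tactics[idx] raises. Pre_ excludes exactly that.
def Pre_find_advancement_tactic_index_py (current_index : Int) (_executed_indices : List Int) (tactics : List (List (String × String))) : Prop :=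
  -(tactics.length : Int) ≤ current_index + 1
instance (current_index : Int) (executed_indices : List Int) (tactics : List (List (String × String))) : Decidable (Pre_find_advancement_tactic_index_py current_index executed_indices tactics) := by unfold Pre_find_advancement_tactic_index_py; infer_instance

def pvWitness_find_advancement_tactic_index_py : Int × List Int × (List (List (String × String))) :=
  (0, [1], [[("name", "regra A")], [("name", "debate B")], [("name", "reuso C")]])

def Spec_find_advancement_tactic_index_py (current_index : Int) (executed_indices : List Int) (tactics : List (List (String × String))) (out : Int) : Prop := out = find_advancement_tactic_index_py_alt current_index executed_indices tactics
instance (current_index : Int) (executed_indices : List Int) (tactics : List (List (String × String))) (out : Int) : Decidable (Spec_find_advancement_tactic_index_py current_index executed_indices tactics out) := by unfold Spec_find_advancement_tactic_index_py; infer_instance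

-- ===== CLAIM (what is proved, stated in full; the proofs are below) =====
def Claim_equal_find_advancement_tactic_index_py : Prop := ∀ (current_index : Int) (executed_indices : List Int) (tactics : List (List (String × String))), Dom_find_advancement_tactic_index_py current_index executed_indices tactics → Pre_find_advancement_tactic_index_py current_index executed_indices tactics → Spec_find_advancement_tactic_index_py current_index executed_indices tactics (find_advancement_tactic_index_py current_index executed_indices tactics)

-- ===== LEMMAS AND PROOFS =====

-- The one-pass loop of B equals A's two scans, generalized over the fallback accumulator.
lemma pvBLoop_eq (ex : PySem.Set Int) (tactics : List (List (String × String))) (ci : Int) :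
    ∀ (L : List Int), (∀ idx ∈ L, (PySem.List.pyGet? tactics idx).isSome) → ∀ (f : Option Int),
      pvBLoop ex tactics ci f L =
        match pvALoop1 ex tactics L with
        | some r => r
        | none =>
          match f with
          | some g => g
          | none => match pvALoop2 tactics L with | some r => r | none => ci := by
  intro L
  induction L with
  | nil => intro _ f; cases f <;> simp [pvBLoop, pvALoop1, pvALoop2]
  | cons idx rest ih =>
    intro hval f
    have hhead : (PySem.List.pyGet? tactics idx).isSome := hval idx (by simp)
    have hrest : ∀ j ∈ rest, (PySem.List.pyGet? tactics j).isSome :=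
      fun j hj => hval j (by simp [hj])
    obtain ⟨t, ht⟩ := Option.isSome_iff_exists.mp hhead
    by_cases hsc : pvTacticKind t == "strategy_change"
    · -- strategy_change: all three loops skip
      simp [pvBLoop, pvALoop1, pvALoop2, ht, hsc, ih hrest f]
    · by_cases hex : idx ∈ ex
      · -- executed, non-strategy_change: loop1 skips, loop2 returns idx, B records fallback
        have := ih hrest (match f with | none => some idx | some g => some g)
        simp [pvBLoop, pvALoop1, pvALoop2, ht, hsc, hex] at this ⊢
        rw [this]
        cases f <;> simp
      · -- not executed, non-strategy_change: loop1 and B both return idx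
        simp [pvBLoop, pvALoop1, ht, hsc, hex]

-- ===== VERDICT (by name: the statement is the Claim_ definition above) =====
theorem find_advancement_tactic_index_py_spec : Claim_equal_find_advancement_tactic_index_py := by
  intro current_index executed_indices tactics _ hpre
  unfold Spec_find_advancement_tactic_index_py
  unfold find_advancement_tactic_index_py find_advancement_tactic_index_py_alt
  have hval : ∀ idx ∈ PySem.List.pyRange (current_index + 1) tactics.length,
      (PySem.List.pyGet? tactics idx).isSome := by
    intro idx hidx
    rw [PySem.List.mem_pyRange_one] at hidx
    rw [Option.isSome_iff_ne_none]
    intro h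
    rw [PySem.List.pyGet?_eq_none_iff] at h
    exact h (by unfold PySem.Raise.InRange; unfold Pre_find_advancement_tactic_index_py at hpre; omega)
  rw [pvBLoop_eq _ _ _ _ hval none]
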